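-- pv_equiv track=rewrite | github.com/fedejordan/website-passwords-generator | generate-passwords.py | combinate_words
-- ===== SOURCE A (Python) =====
-- def combinate_words(words, combinations_number, previous_combinations=[]):
-- 	if len(previous_combinations) == 0:
-- 		return combinate_words(words, combinations_number, words)
--
-- 	new_combinations = []
-- 	for word in words:
-- 		for previous_combination in previous_combinations:
-- 			new_combinations.append(word + previous_combination)
--
-- 	if combinations_number > 1:
-- 		return combinate_words(words, combinations_number - 1, new_combinations)
-- 	return new_combinations
-- ===== SOURCE B (Python) =====
-- def combinate_words(words, combinations_number, previous_combinations=[]):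
--     result = previous_combinations if previous_combinations else words
--     for _ in range(max(combinations_number, 1)):
--         result = [w + r for w in words for r in result]
--     return result
-- ===== Notes on version B (the rewrite author's own statement) =====
-- stated objective: simpler
-- what changed: Replaced A's double recursion (re-entry to seed an empty previous list, then one recursive call per pass) by a single iterative loop that runs max(k,1) comprehension build passes; no recursion at all.
import Mathlib
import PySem

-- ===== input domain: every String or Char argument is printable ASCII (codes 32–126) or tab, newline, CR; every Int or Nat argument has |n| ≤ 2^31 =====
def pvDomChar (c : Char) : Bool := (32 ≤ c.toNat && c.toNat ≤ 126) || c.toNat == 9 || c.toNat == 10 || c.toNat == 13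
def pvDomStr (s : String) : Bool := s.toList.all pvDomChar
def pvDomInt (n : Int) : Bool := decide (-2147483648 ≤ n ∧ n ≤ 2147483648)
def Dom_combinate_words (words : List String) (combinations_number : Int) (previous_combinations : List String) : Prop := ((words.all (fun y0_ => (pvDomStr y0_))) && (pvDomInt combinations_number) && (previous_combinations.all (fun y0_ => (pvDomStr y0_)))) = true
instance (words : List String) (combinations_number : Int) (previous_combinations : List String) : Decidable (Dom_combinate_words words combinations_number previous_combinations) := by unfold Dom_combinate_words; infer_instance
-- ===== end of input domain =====

-- B replaces A's double recursion by a single iterative loop of max(k,1) build passes: simpler, no recursion.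
-- ===== PORT A =====
-- A is recursive; the fuel only makes the recursion total in Lean (it is never exhausted on Pre_-admitted inputs).
def combinate_wordsFuel (fuel : Nat) (words : List String) (combinations_number : Int) (previous_combinations : List String) : List String :=
  match fuel with
  | 0 => []
  | fuel + 1 =>
    if previous_combinations.length = 0 then
      combinate_wordsFuel fuel words combinations_number words
    else
      let new_combinations :=
        words.foldl (fun acc word =>
          previous_combinations.foldl (fun acc previous_combination =>
            acc ++ [word ++ previous_combination]) acc) []
      if combinations_number > 1 then
        combinate_wordsFuel fuel words (combinations_number - 1) new_combinations
      else
        new_combinations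

def combinate_words (words : List String) (combinations_number : Int) (previous_combinations : List String) : List String :=
  combinate_wordsFuel (combinations_number.toNat + 2) words combinations_number previous_combinations

-- ===== PORT B =====
def combinate_words_alt (words : List String) (combinations_number : Int) (previous_combinations : List String) : List String :=
  let init := if previous_combinations.isEmpty then words else previous_combinations
  (List.range (max combinations_number 1).toNat).foldl
    (fun result _ => words.flatMap (fun w => result.map (fun r => w ++ r))) init

-- ===== PRECONDITION & SPEC =====
-- Pre_ excludes exactly the inputs where A recurses forever and raises RecursionError (empty words with empty previous list or more than one pass requested); A returns normally on every input Pre_ admits.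
def Pre_combinate_words (words : List String) (combinations_number : Int) (previous_combinations : List String) : Prop :=
  words ≠ [] ∨ (previous_combinations ≠ [] ∧ combinations_number ≤ 1)
instance (words : List String) (combinations_number : Int) (previous_combinations : List String) : Decidable (Pre_combinate_words words combinations_number previous_combinations) := by unfold Pre_combinate_words; infer_instance

def pvWitness_combinate_words : List String × Int × List String := (["ab", "c"], 2, [])

def Spec_combinate_words (words : List String) (combinations_number : Int) (previous_combinations : List String) (out : List String) : Prop := out = combinate_words_alt words combinations_number previous_combinations
instance (words : List String) (combinations_number : Int) (previous_combinations : List String) (out : List String) : Decidable (Spec_combinate_words words combinations_number previous_combinations out) := by unfold Spec_combinate_words; infer_instance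

-- ===== CLAIM (what is proved, stated in full; the proofs are below) =====
def Claim_equal_combinate_words : Prop := ∀ (words : List String) (combinations_number : Int) (previous_combinations : List String), Dom_combinate_words words combinations_number previous_combinations → Pre_combinate_words words combinations_number previous_combinations → Spec_combinate_words words combinations_number previous_combinations (combinate_words words combinations_number previous_combinations)


-- ===== LEMMAS AND PROOFS =====

-- one build pass, in B's form
def pvStep (words : List String) (result : List String) : List String :=
  words.flatMap (fun w => result.map (fun r => w ++ r))

theorem pvInner_eq (words prev : List String) :
    words.foldl (fun acc word =>
      prev.foldl (fun acc p => acc ++ [word ++ p]) acc) [] = pvStep words prev := by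
  have inner : ∀ (w : String) (acc : List String),
      prev.foldl (fun acc p => acc ++ [w ++ p]) acc = acc ++ prev.map (fun p => w ++ p) := by
    intro w
    induction prev with
    | nil => intro acc; simp
    | cons p t ih => intro acc; simp [List.foldl_cons, ih]
  have outer : ∀ (ws acc : List String),
      ws.foldl (fun acc word => prev.foldl (fun acc p => acc ++ [word ++ p]) acc) acc
        = acc ++ ws.flatMap (fun w => prev.map (fun p => w ++ p)) := by
    intro ws
    induction ws with
    | nil => intro acc; simp
    | cons w t ih =>
      intro acc
      rw [List.foldl_cons, inner, ih, List.flatMap_cons, List.append_assoc]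
  simpa using outer words []

theorem pvRange_foldl (words : List String) (n : Nat) (init : List String) :
    (List.range n).foldl (fun result _ => pvStep words result) init
      = (pvStep words)^[n] init := by
  induction n generalizing init with
  | zero => simp
  | succ m ih =>
    simp [List.range_succ, List.foldl_append, ih, Function.iterate_succ_apply']

-- A's recursion, for nonempty words and prev and enough fuel, computes max(k,1) passes
theorem pvStep_ne_nil (words prev : List String) (hw : words ≠ []) (hp : prev ≠ []) :
    pvStep words prev ≠ [] := by
  rcases words with _ | ⟨w, wt⟩
  · exact absurd rfl hw
  · rcases prev with _ | ⟨p, pt⟩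
    · exact absurd rfl hp
    · simp [pvStep]

theorem pvFuel_eq (fuel : Nat) (words : List String) (k : Int) (prev : List String)
    (hwords : words ≠ []) (hprev : prev ≠ []) (hfuel : (max k 1).toNat ≤ fuel) :
    combinate_wordsFuel fuel words k prev = (pvStep words)^[(max k 1).toNat] prev := by
  induction fuel generalizing k prev with
  | zero =>
    exfalso
    have h1 : (1:Int) ≤ max k 1 := le_max_right _ _
    omega
  | succ f ih =>
    have hlen : ¬ prev.length = 0 := by simpa [List.length_eq_zero_iff] using hprev
    by_cases hk : k > 1
    · have hmax : (max k 1).toNat = (max (k-1) 1).toNat + 1 := by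
        by_cases h : k - 1 ≤ 1
        · rw [max_eq_left (by omega), max_eq_right h]; omega
        · rw [max_eq_left (by omega), max_eq_left (by omega)]; omega
      have hps := pvStep_ne_nil words prev hwords hprev
      simp only [combinate_wordsFuel, if_neg hlen]
      rw [if_pos hk, pvInner_eq, ih (k-1) (pvStep words prev) hps (by omega),
          hmax, Function.iterate_succ_apply]
    · have hmax : (max k 1).toNat = 1 := by
        rw [max_eq_right (by omega)]; rfl
      simp only [combinate_wordsFuel, if_neg hlen]
      rw [if_neg hk, pvInner_eq, hmax, Function.iterate_one]

theorem pvFuelBound (k : Int) : (max k 1).toNat ≤ k.toNat + 1 := by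
  by_cases h : k ≤ 1
  · rw [max_eq_right h]; omega
  · rw [max_eq_left (by omega)]; omega

-- ===== VERDICT (by name: the statement is the Claim_ definition above) =====
theorem combinate_words_spec : Claim_equal_combinate_words := by
  intro words k prev _ hpre
  unfold Spec_combinate_words combinate_words combinate_words_alt
  show combinate_wordsFuel (k.toNat + 2) words k prev
      = (List.range (max k 1).toNat).foldl (fun result _ => pvStep words result)
          (if prev.isEmpty then words else prev)
  rw [pvRange_foldl]
  by_cases hp : prev = []
  · subst hp
    have hw : words ≠ [] := by
      rcases hpre with h | ⟨h, _⟩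
      · exact h
      · exact absurd rfl h
    simp only [combinate_wordsFuel, List.length_nil, List.isEmpty_nil]
    exact pvFuel_eq (k.toNat + 1) words k words hw hw (pvFuelBound k)
  · have hlen : ¬ prev.length = 0 := by simpa [List.length_eq_zero_iff] using hp
    have hie : prev.isEmpty = false := by simpa [List.isEmpty_iff] using hp
    rw [hie]
    simp only [Bool.false_eq_true, if_false]
    by_cases hw : words = []
    · have hk : k ≤ 1 := by
        rcases hpre with h | ⟨_, h⟩
        · exact absurd hw h
        · exact h
      have hmax : (max k 1).toNat = 1 := by rw [max_eq_right hk]; rfl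
      subst hw
      simp only [combinate_wordsFuel, if_neg hlen, List.foldl_nil, if_neg (by omega : ¬ k > 1),
        hmax, Function.iterate_one, pvStep, List.flatMap_nil]
    · exact pvFuel_eq (k.toNat + 2) words k prev hw hp (by have := pvFuelBound k; omega)
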